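-- pv_equiv track=rewrite | github.com/MaTriXy/video-generator | video-tools/scripts/assets/emoji/build_icon_index.py | tokenize_icon_name
-- ===== SOURCE A (Python) =====
-- STOP_WORDS = {'icon', 'icons', 'outline', 'solid', 'fill', 'filled', 'line', 'regular', 'bold', 'thin', 'light', 'sharp', 'round', 'rounded'}
--
-- def tokenize_icon_name(icon_name: str, library: str) -> set[str]:
--     """
--     Extract searchable tokens from an icon name.
--     Returns a set of lowercase words.
--
--     Example: "fa-brain-circuit" -> {"brain", "circuit"}
--     """
--     # Remove library prefix if present
--     name = icon_name
--     if name.startswith(library + "-"):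
--         name = name[len(library) + 1:]
--     elif name.startswith(library):
--         name = name[len(library):]
--
--     # Split on common delimiters: dash, underscore, camelCase
--     # First replace dashes/underscores with spaces
--     name = name.replace("-", " ").replace("_", " ")
--
--     # Handle camelCase: insert space before uppercase letters
--     result = []
--     for char in name:
--         if char.isupper() and result and result[-1] != ' ':
--             result.append(' ')
--         result.append(char.lower())
--     name = ''.join(result)
--
--     # Split into words and filter
--     words = set()
--     for word in name.split():
--         word = word.strip()
--         # Skip empty, single-char, numeric-only, and stop words
--         if len(word) > 1 and not word.isdigit() and word not in STOP_WORDS: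
--             words.add(word)
--
--     return words
-- ===== SOURCE B (Python) =====
-- STOP_WORDS = {'icon', 'icons', 'outline', 'solid', 'fill', 'filled', 'line', 'regular', 'bold', 'thin', 'light', 'sharp', 'round', 'rounded'}
--
--
-- def _keep(word):
--     return len(word) > 1 and not word.isdigit() and word not in STOP_WORDS
--
--
-- def tokenize_icon_name(icon_name: str, library: str) -> set[str]:
--     # Single-pass tokenizer: strip the library prefix, then scan once,
--     # cutting a token at '-', '_', whitespace, or before an uppercase letter,
--     # lowercasing as we go and filtering each token the moment it is cut.
--     name = icon_name
--     if name.startswith(library + "-"):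
--         name = name[len(library) + 1:]
--     elif name.startswith(library):
--         name = name[len(library):]
--
--     words = set()
--     cur = ""
--     for ch in name:
--         if ch == '-' or ch == '_' or ch.isspace():
--             if _keep(cur):
--                 words.add(cur)
--             cur = ""
--         elif ch.isupper():
--             if _keep(cur):
--                 words.add(cur)
--             cur = ch.lower()
--         else:
--             cur += ch.lower()
--     if _keep(cur):
--         words.add(cur)
--     return words
-- ===== Notes on version B (the rewrite author's own statement) =====
-- stated objective: simpler
-- what changed: A's three normalization passes (replace dashes/underscores with spaces, a camelCase re-spacing loop building a new string, then split+strip+filter) are fused into one scan over the prefix-stripped name that cuts tokens at delimiters/whitespace/uppercase boundaries and lowercases and filters each token as it is cut.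
import Mathlib
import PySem

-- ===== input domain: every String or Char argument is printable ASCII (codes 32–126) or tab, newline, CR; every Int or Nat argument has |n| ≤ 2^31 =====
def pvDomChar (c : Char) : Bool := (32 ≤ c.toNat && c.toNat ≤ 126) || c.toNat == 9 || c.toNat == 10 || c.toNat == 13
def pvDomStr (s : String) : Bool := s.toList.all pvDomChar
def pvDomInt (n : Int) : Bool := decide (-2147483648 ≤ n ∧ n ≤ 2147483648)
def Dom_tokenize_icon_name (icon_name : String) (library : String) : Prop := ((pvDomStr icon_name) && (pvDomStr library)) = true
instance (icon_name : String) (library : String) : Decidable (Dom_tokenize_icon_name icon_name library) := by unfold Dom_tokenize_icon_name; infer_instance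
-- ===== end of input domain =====

-- B fuses A's three normalization passes (delimiter replace, camelCase respacing, split+filter)
-- into a single scan with a pending-token accumulator; objective: simpler one-pass decomposition.
-- Both programs return a set of strings; the ports return its distinct elements in insertion order.

def pvSTOP : PySem.Set (List Char) :=
  PySem.Set.ofList (["icon", "icons", "outline", "solid", "fill", "filled", "line", "regular",
    "bold", "thin", "light", "sharp", "round", "rounded"].map String.toList)

-- ===== PORT A =====
def tokenize_icon_name (icon_name : String) (library : String) : List String :=
  let name := icon_name.toList
  let lib := library.toList
  let name :=
    if PySem.Chars.startswith name (lib ++ ['-']) then name.drop (lib.length + 1)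
    else if PySem.Chars.startswith name lib then name.drop lib.length
    else name
  let name := PySem.Chars.replace (PySem.Chars.replace name ['-'] [' ']) ['_'] [' ']
  let result := name.foldl (fun (r : List Char) c =>
    if PySem.Chars.isupper c && !r.isEmpty && !(r.getLast? == some ' ')
    then r ++ [' '] ++ [PySem.Chars.lowerChar c]
    else r ++ [PySem.Chars.lowerChar c]) []
  let name := result
  let words := (PySem.Chars.split₀ name).foldl (fun (w : PySem.Set (List Char)) word =>
    let word := PySem.Chars.strip word
    if decide (1 < word.length) && !PySem.Chars.strIsdigit word && !(pvSTOP.contains word)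
    then PySem.Set.add w word else w) PySem.Set.empty
  words.map String.ofList

-- ===== PORT B =====
def pvKeep (word : List Char) : Bool :=
  decide (1 < word.length) && !PySem.Chars.strIsdigit word && !(pvSTOP.contains word)

def tokenize_icon_name_alt (icon_name : String) (library : String) : List String :=
  let name := icon_name.toList
  let lib := library.toList
  let name :=
    if PySem.Chars.startswith name (lib ++ ['-']) then name.drop (lib.length + 1)
    else if PySem.Chars.startswith name lib then name.drop lib.length
    else name
  let st := name.foldl (fun (p : PySem.Set (List Char) × List Char) c =>
    if c == '-' || c == '_' || PySem.Chars.isspace c then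
      ((if pvKeep p.2 then PySem.Set.add p.1 p.2 else p.1), [])
    else if PySem.Chars.isupper c then
      ((if pvKeep p.2 then PySem.Set.add p.1 p.2 else p.1), [PySem.Chars.lowerChar c])
    else (p.1, p.2 ++ [PySem.Chars.lowerChar c])) (PySem.Set.empty, [])
  (if pvKeep st.2 then PySem.Set.add st.1 st.2 else st.1).map String.ofList

-- ===== PRECONDITION & SPEC =====
def Spec_tokenize_icon_name (icon_name : String) (library : String) (out : List String) : Prop := out = tokenize_icon_name_alt icon_name library
instance (icon_name : String) (library : String) (out : List String) : Decidable (Spec_tokenize_icon_name icon_name library out) := by unfold Spec_tokenize_icon_name; infer_instance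

-- ===== CLAIM (what is proved, stated in full; the proofs are below) =====
def Claim_equal_tokenize_icon_name : Prop := ∀ (icon_name : String) (library : String), Dom_tokenize_icon_name icon_name library → Spec_tokenize_icon_name icon_name library (tokenize_icon_name icon_name library)

-- ===== LEMMAS AND PROOFS =====

-- single-character replace is a map
theorem pv_replace_go_single (a b : Char) :
    ∀ (l : List Char) (fuel : Nat) (acc : List Char), l.length ≤ fuel →
      PySem.Chars.replace.go [a] [b] fuel l acc
        = acc.reverse ++ l.map (fun c => if c == a then b else c) := by
  intro l
  induction l with
  | nil => intro fuel acc _; cases fuel <;> rw [PySem.Chars.replace.go] <;> simp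
  | cons c t ih =>
    intro fuel acc hf
    cases fuel with
    | zero => simp at hf
    | succ f =>
      rw [PySem.Chars.replace.go]
      have hp : ([a].isPrefixOf (c :: t)) = (a == c) := by simp [List.isPrefixOf]
      rw [hp]
      by_cases hc : a = c
      · rw [if_pos (by simp [hc])]
        have hd : List.drop ([a].length) (c :: t) = t := by simp
        rw [hd, ih f _ (by simpa using hf)]
        simp [hc]
      · rw [if_neg (by simp [hc]), ih f _ (by simpa using hf)]
        simp [Ne.symm hc]

theorem pv_replace_single (a b : Char) (cs : List Char) :
    PySem.Chars.replace cs [a] [b] = cs.map (fun c => if c == a then b else c) := by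
  rw [PySem.Chars.replace, if_neg (by simp)]
  rw [pv_replace_go_single a b cs cs.length [] le_rfl]
  simp

-- the delimiter normalization of A, as one map
def pvRepl (c : Char) : Char := if c == '-' || c == '_' then ' ' else c

-- A's camelCase loop as a structural recursion on the remaining characters;
-- the Bool is "result is nonempty and its last char is not ' '"
def pvCam (b : Bool) : List Char → List Char
  | [] => []
  | c :: cs =>
      if PySem.Chars.isupper c && b
      then ' ' :: PySem.Chars.lowerChar c :: pvCam (!(PySem.Chars.lowerChar c == ' ')) cs
      else PySem.Chars.lowerChar c :: pvCam (!(PySem.Chars.lowerChar c == ' ')) cs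

theorem pv_cam_foldl (cs : List Char) : ∀ (r : List Char),
    cs.foldl (fun (r : List Char) c =>
      if PySem.Chars.isupper c && !r.isEmpty && !(r.getLast? == some ' ')
      then r ++ [' '] ++ [PySem.Chars.lowerChar c]
      else r ++ [PySem.Chars.lowerChar c]) r
    = r ++ pvCam (!r.isEmpty && !(r.getLast? == some ' ')) cs := by
  induction cs with
  | nil => intro r; simp [pvCam]
  | cons c cs ih =>
    intro r
    rw [List.foldl_cons, ih]
    by_cases hcond : (PySem.Chars.isupper c && !r.isEmpty && !(r.getLast? == some ' ')) = true
    · have hb : (PySem.Chars.isupper c && (!r.isEmpty && !(r.getLast? == some ' '))) = true := by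
        rw [Bool.and_assoc] at hcond; exact hcond
      rw [if_pos hcond, pvCam, if_pos hb]
      have hx : ((r ++ [' ']) ++ [PySem.Chars.lowerChar c]).isEmpty = false := by simp
      have hg : ((r ++ [' ']) ++ [PySem.Chars.lowerChar c]).getLast? = some (PySem.Chars.lowerChar c) :=
        List.getLast?_concat
      rw [hx, hg, Bool.not_false, Bool.true_and]
      simp
    · have hb : (PySem.Chars.isupper c && (!r.isEmpty && !(r.getLast? == some ' '))) = false := by
        rw [Bool.and_assoc] at hcond; simpa using hcond
      rw [if_neg (by simp [hcond]), pvCam, if_neg (by simp [hb])]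
      have hx : (r ++ [PySem.Chars.lowerChar c]).isEmpty = false := by simp
      have hg : (r ++ [PySem.Chars.lowerChar c]).getLast? = some (PySem.Chars.lowerChar c) :=
        List.getLast?_concat
      rw [hx, hg, Bool.not_false, Bool.true_and]
      simp

-- the common token list: pending (already lowered) token `pend`, remaining raw characters
def pvTok (pend : List Char) : List Char → List (List Char)
  | [] => if pend.isEmpty then [] else [pend]
  | c :: cs =>
      if c == '-' || c == '_' || PySem.Chars.isspace c then
        (if pend.isEmpty then pvTok [] cs else pend :: pvTok [] cs)
      else if PySem.Chars.isupper c then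
        (if pend.isEmpty then pvTok [PySem.Chars.lowerChar c] cs
         else pend :: pvTok [PySem.Chars.lowerChar c] cs)
      else pvTok (pend ++ [PySem.Chars.lowerChar c]) cs

theorem pv_toNat_ofNat {n : Nat} (h : n < 55296) : (Char.ofNat n).toNat = n := by
  have hv : n.isValidChar := Or.inl (by simpa using h)
  rw [Char.ofNat, dif_pos hv]
  simp [Char.ofNatAux, Char.toNat]

theorem pv_upper_bounds {c : Char} (h : PySem.Chars.isupper c = true) :
    65 ≤ c.toNat ∧ c.toNat ≤ 90 := by
  simp only [PySem.Chars.isupper, Bool.and_eq_true, decide_eq_true_eq] at h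
  rw [Char.le_def, Char.le_def] at h
  exact ⟨h.1, h.2⟩

theorem pv_upper_not_space {c : Char} (h : PySem.Chars.isupper c = true) :
    PySem.Chars.isspace c = false := by
  have hb := pv_upper_bounds h
  simp only [PySem.Chars.isspace, Bool.or_eq_false_iff, Bool.and_eq_false_iff,
    decide_eq_false_iff_not]
  omega

theorem pv_space_bounds {c : Char} (h : PySem.Chars.isspace c = false) :
    c.toNat ≠ 32 := by
  simp only [PySem.Chars.isspace, Bool.or_eq_false_iff, Bool.and_eq_false_iff,
    decide_eq_false_iff_not] at h
  omega

theorem pv_lower_toNat {c : Char} (h : PySem.Chars.isupper c = true) :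
    (PySem.Chars.lowerChar c).toNat = c.toNat + 32 := by
  have hb := pv_upper_bounds h
  rw [PySem.Chars.lowerChar, if_pos h]
  exact pv_toNat_ofNat (by omega)

theorem pv_lower_upper_not_space {c : Char} (h : PySem.Chars.isupper c = true) :
    PySem.Chars.isspace (PySem.Chars.lowerChar c) = false ∧
      (PySem.Chars.lowerChar c == ' ') = false := by
  have hb := pv_upper_bounds h
  have hval := pv_lower_toNat h
  constructor
  · simp only [PySem.Chars.isspace, Bool.or_eq_false_iff, Bool.and_eq_false_iff,
      decide_eq_false_iff_not]
    omega
  · have hne : PySem.Chars.lowerChar c ≠ ' ' := by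
      intro he
      rw [he] at hval
      have h32 : (' ' : Char).toNat = 32 := rfl
      omega
    simp [hne]

theorem pv_lower_of_not_upper {c : Char} (h : PySem.Chars.isupper c = false) :
    PySem.Chars.lowerChar c = c := by
  rw [PySem.Chars.lowerChar, if_neg (by simp [h])]

-- A side: splitting the camel-cased, delimiter-replaced string gives exactly pvTok
theorem pv_A_tokens : ∀ (cs : List Char) (b : Bool) (pend : List Char) (acc : List (List Char)),
    (pend ≠ [] → b = true) →
    (∀ c ∈ pend, PySem.Chars.isspace c = false) →
    PySem.Chars.split₀.go (pvCam b (cs.map pvRepl)) pend.reverse acc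
      = acc.reverse ++ pvTok pend cs := by
  intro cs
  induction cs with
  | nil =>
    intro b pend acc hb hws
    rw [List.map_nil, show pvCam b [] = [] from rfl, PySem.Chars.split₀.go]
    cases pend with
    | nil => simp [pvTok]
    | cons p ps => simp [pvTok]
  | cons c cs ih =>
    intro b pend acc hb hws
    rw [List.map_cons]
    by_cases hdelim : (c == '-' || c == '_') = true
    · -- dash or underscore: becomes a space, flushing the pending token
      have hr : pvRepl c = ' ' := by simp [pvRepl, hdelim]
      have hu : PySem.Chars.isupper ' ' = false := by decide
      have hl : PySem.Chars.lowerChar ' ' = ' ' := by decide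
      have hsp2 : PySem.Chars.isspace ' ' = true := by decide
      cases pend with
      | nil =>
        have key := ih false [] acc (by simp) (by simp)
        simp only [List.reverse_nil] at key
        simp [pvCam, pvTok, PySem.Chars.split₀.go, hr, hu, hl, hdelim, hsp2, key]
      | cons p ps =>
        have key := ih false [] ((p :: ps) :: acc) (by simp) (by simp)
        simp only [List.reverse_nil] at key
        simp [pvCam, pvTok, PySem.Chars.split₀.go, hr, hu, hl, hdelim, hsp2, key]
    · by_cases hsp : PySem.Chars.isspace c = true
      · -- a whitespace character, kept as is, flushing the pending token
        have hr : pvRepl c = c := by simp [pvRepl, hdelim]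
        have hup : PySem.Chars.isupper c = false := by
          by_contra h
          rw [pv_upper_not_space (by simpa using h)] at hsp
          exact absurd hsp (by simp)
        have hl : PySem.Chars.lowerChar c = c := pv_lower_of_not_upper hup
        cases pend with
        | nil =>
          have key := ih (!(c == ' ')) [] acc (by simp) (by simp)
          simp only [List.reverse_nil] at key
          simp [pvCam, pvTok, PySem.Chars.split₀.go, hr, hup, hl, hdelim, hsp, key]
        | cons p ps =>
          have key := ih (!(c == ' ')) [] ((p :: ps) :: acc) (by simp) (by simp)
          simp only [List.reverse_nil] at key
          simp [pvCam, pvTok, PySem.Chars.split₀.go, hr, hup, hl, hdelim, hsp, key]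
      · by_cases hup : PySem.Chars.isupper c = true
        · -- an uppercase letter: a token boundary, its lowered form starts the next token
          have hr : pvRepl c = c := by simp [pvRepl, hdelim]
          obtain ⟨hls, hlne⟩ := pv_lower_upper_not_space hup
          have hsp2 : PySem.Chars.isspace ' ' = true := by decide
          have key0 := fun acc' => ih true
            [PySem.Chars.lowerChar c] acc' (fun _ => rfl) (by simpa using hls)
          by_cases hbv : b = true
          · cases pend with
            | nil =>
              have key := key0 acc
              simp only [List.reverse_cons, List.reverse_nil, List.nil_append] at key
              simp [pvCam, pvTok, PySem.Chars.split₀.go, hr, hup, hdelim, hsp, hsp2, hbv,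
                hls, hlne, key]
            | cons p ps =>
              have key := key0 ((p :: ps) :: acc)
              simp only [List.reverse_cons, List.reverse_nil, List.nil_append] at key
              simp [pvCam, pvTok, PySem.Chars.split₀.go, hr, hup, hdelim, hsp, hsp2, hbv,
                hls, hlne, key]
          · have hbf : b = false := by simpa using hbv
            have hpe : pend = [] := by
              by_contra h
              rw [hb h] at hbf
              exact absurd hbf (by simp)
            subst hpe
            have key := key0 acc
            simp only [List.reverse_cons, List.reverse_nil, List.nil_append] at key
            simp [pvCam, pvTok, PySem.Chars.split₀.go, hr, hup, hdelim, hsp, hbf, hls, hlne, key]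
        · -- an ordinary character: extends the current token
          have hr : pvRepl c = c := by simp [pvRepl, hdelim]
          have hup' : PySem.Chars.isupper c = false := by simpa using hup
          have hl : PySem.Chars.lowerChar c = c := pv_lower_of_not_upper hup'
          have hsp' : PySem.Chars.isspace c = false := by simpa using hsp
          have hcne : (c == ' ') = false := by
            have h32 := pv_space_bounds hsp'
            rw [beq_eq_false_iff_ne]
            intro he
            exact h32 (by rw [he]; rfl)
          have hws' : ∀ x ∈ pend ++ [c], PySem.Chars.isspace x = false := by
            intro x hx
            rcases List.mem_append.mp hx with h | h
            · exact hws x h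
            · simp at h; subst h; exact hsp'
          have key := ih (!(c == ' ')) (pend ++ [c]) acc (fun _ => by simp [hcne]) hws'
          simp only [List.reverse_append, List.reverse_cons, List.reverse_nil,
            List.nil_append, List.singleton_append] at key
          simp [pvCam, pvTok, PySem.Chars.split₀.go, hr, hup', hl, hdelim, hsp', key]

-- tokens contain no whitespace
theorem pv_tok_no_ws : ∀ (cs : List Char) (pend : List Char),
    (∀ c ∈ pend, PySem.Chars.isspace c = false) →
    ∀ w ∈ pvTok pend cs, ∀ c ∈ w, PySem.Chars.isspace c = false := by
  intro cs
  induction cs with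
  | nil =>
    intro pend hws w hw
    cases pend with
    | nil => simp [pvTok] at hw
    | cons p ps =>
      simp [pvTok] at hw
      subst hw
      exact hws
  | cons c cs ih =>
    intro pend hws w hw
    rw [pvTok] at hw
    by_cases h1 : (c == '-' || c == '_' || PySem.Chars.isspace c) = true
    · rw [if_pos h1] at hw
      by_cases hp : pend.isEmpty = true
      · rw [if_pos hp] at hw
        exact ih [] (by simp) w hw
      · rw [if_neg hp] at hw
        rcases List.mem_cons.mp hw with he | hm
        · subst he; exact hws
        · exact ih [] (by simp) w hm
    · rw [if_neg h1] at hw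
      by_cases h2 : PySem.Chars.isupper c = true
      · rw [if_pos h2] at hw
        have hlc := (pv_lower_upper_not_space h2).1
        by_cases hp : pend.isEmpty = true
        · rw [if_pos hp] at hw
          exact ih [PySem.Chars.lowerChar c] (by simpa using hlc) w hw
        · rw [if_neg hp] at hw
          rcases List.mem_cons.mp hw with he | hm
          · subst he; exact hws
          · exact ih [PySem.Chars.lowerChar c] (by simpa using hlc) w hm
      · rw [if_neg h2] at hw
        have hsp' : PySem.Chars.isspace c = false := by
          simp only [Bool.or_eq_true, not_or] at h1
          simpa using h1.2
        have hl : PySem.Chars.lowerChar c = c := pv_lower_of_not_upper (by simpa using h2)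
        refine ih (pend ++ [PySem.Chars.lowerChar c]) ?_ w hw
        intro x hx
        rcases List.mem_append.mp hx with h | h
        · exact hws x h
        · simp at h; subst h; rw [hl]; exact hsp'

theorem pv_strip_eq_self {w : List Char} (h : ∀ c ∈ w, PySem.Chars.isspace c = false) :
    PySem.Chars.strip w = w := by
  have hdrop : ∀ (l : List Char), (∀ c ∈ l, PySem.Chars.isspace c = false) →
      List.dropWhile PySem.Chars.isspace l = l := by
    intro l hl
    cases l with
    | nil => rfl
    | cons c t => exact List.dropWhile_cons_of_neg (by simp [hl c (by simp)])
  rw [PySem.Chars.strip, PySem.Chars.lstrip, PySem.Chars.rstrip, hdrop w h,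
    hdrop w.reverse (by intro c hc; exact h c (List.mem_reverse.mp hc)), List.reverse_reverse]

-- a fold congruence for the strip-removal step
theorem pv_foldl_congr {α β : Type} (l : List β) (f g : α → β → α)
    (h : ∀ a, ∀ b ∈ l, f a b = g a b) : ∀ a, l.foldl f a = l.foldl g a := by
  induction l with
  | nil => intro a; rfl
  | cons b t ih =>
    intro a
    rw [List.foldl_cons, List.foldl_cons, h a b (by simp)]
    exact ih (fun a b hb => h a b (by simp [hb])) _

-- B side: the single-pass loop equals a fold of the filter step over pvTok
theorem pv_B_fold : ∀ (cs : List Char) (words : PySem.Set (List Char)) (pend : List Char),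
    (let st := cs.foldl (fun (p : PySem.Set (List Char) × List Char) c =>
        if c == '-' || c == '_' || PySem.Chars.isspace c then
          ((if pvKeep p.2 then PySem.Set.add p.1 p.2 else p.1), [])
        else if PySem.Chars.isupper c then
          ((if pvKeep p.2 then PySem.Set.add p.1 p.2 else p.1), [PySem.Chars.lowerChar c])
        else (p.1, p.2 ++ [PySem.Chars.lowerChar c])) (words, pend);
      if pvKeep st.2 then PySem.Set.add st.1 st.2 else st.1)
    = (pvTok pend cs).foldl (fun w t => if pvKeep t then PySem.Set.add w t else w) words := by
  intro cs
  induction cs with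
  | nil =>
    intro words pend
    cases pend with
    | nil => simp [pvTok, show pvKeep ([] : List Char) = false from rfl]
    | cons p ps => simp [pvTok]
  | cons c cs ih =>
    intro words pend
    simp only [List.foldl_cons]
    by_cases h1 : (c == '-' || c == '_' || PySem.Chars.isspace c) = true
    · have key := ih (if pvKeep pend then PySem.Set.add words pend else words) []
      cases pend with
      | nil => simpa [pvTok, h1, show pvKeep ([] : List Char) = false from rfl] using key
      | cons p ps => simpa [pvTok, h1] using key
    · by_cases h2 : PySem.Chars.isupper c = true
      · have key := ih (if pvKeep pend then PySem.Set.add words pend else words)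
          [PySem.Chars.lowerChar c]
        cases pend with
        | nil => simpa [pvTok, h1, h2, show pvKeep ([] : List Char) = false from rfl] using key
        | cons p ps => simpa [pvTok, h1, h2] using key
      · have key := ih words (pend ++ [PySem.Chars.lowerChar c])
        simpa [pvTok, h1, h2] using key

-- the whole pipeline, for an arbitrary prefix-stripped character list
theorem pv_main (N : List Char) :
    ((PySem.Chars.split₀ ((PySem.Chars.replace (PySem.Chars.replace N ['-'] [' ']) ['_'] [' ']).foldl
        (fun (r : List Char) c =>
          if PySem.Chars.isupper c && !r.isEmpty && !(r.getLast? == some ' ')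
          then r ++ [' '] ++ [PySem.Chars.lowerChar c]
          else r ++ [PySem.Chars.lowerChar c]) [])).foldl
      (fun (w : PySem.Set (List Char)) word =>
        let word := PySem.Chars.strip word
        if decide (1 < word.length) && !PySem.Chars.strIsdigit word && !(pvSTOP.contains word)
        then PySem.Set.add w word else w) PySem.Set.empty).map String.ofList
    = ((let st := N.foldl (fun (p : PySem.Set (List Char) × List Char) c =>
          if c == '-' || c == '_' || PySem.Chars.isspace c then
            ((if pvKeep p.2 then PySem.Set.add p.1 p.2 else p.1), [])
          else if PySem.Chars.isupper c then
            ((if pvKeep p.2 then PySem.Set.add p.1 p.2 else p.1), [PySem.Chars.lowerChar c])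
          else (p.1, p.2 ++ [PySem.Chars.lowerChar c])) (PySem.Set.empty, []);
        if pvKeep st.2 then PySem.Set.add st.1 st.2 else st.1).map String.ofList) := by
  have hA : PySem.Chars.replace (PySem.Chars.replace N ['-'] [' ']) ['_'] [' '] = N.map pvRepl := by
    rw [pv_replace_single, pv_replace_single, List.map_map]
    apply List.map_congr_left
    intro c _
    by_cases h1 : c = '-'
    · simp [Function.comp, pvRepl, h1]
    · by_cases h2 : c = '_'
      · simp [Function.comp, pvRepl, h2]
      · simp [Function.comp, pvRepl, h1, h2]
  rw [hA, pv_cam_foldl]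
  have h2 : PySem.Chars.split₀.go (pvCam false (N.map pvRepl)) [] [] = pvTok [] N := by
    simpa using pv_A_tokens N false [] [] (by simp) (by simp)
  rw [show (!(([] : List Char).isEmpty) && !(([] : List Char).getLast? == some ' ')) = false from rfl]
  rw [List.nil_append, PySem.Chars.split₀, h2]
  rw [pv_B_fold N PySem.Set.empty []]
  congr 1
  apply pv_foldl_congr
  intro a w hw
  have hs : PySem.Chars.strip w = w :=
    pv_strip_eq_self (pv_tok_no_ws N [] (by simp) w hw)
  simp only [hs, pvKeep]
  rfl

-- ===== VERDICT (by name: the statement is the Claim_ definition above) =====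
theorem tokenize_icon_name_spec : Claim_equal_tokenize_icon_name := by
  intro icon_name library _
  unfold Spec_tokenize_icon_name tokenize_icon_name tokenize_icon_name_alt
  exact pv_main _
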